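-- pv_equiv track=rewrite | github.com/jsymons/base-python-curriculum | unit-8-advanced-control-flow/lesson-18-subtract-reversed/solutions/solution_.py | subtract_reversed
-- ===== SOURCE A (Python) =====
-- def subtract_reversed(a_list):
--     if len(a_list) == 0:
--         return 0
--
--     result = a_list[-1]
--     index = 2
--     while index <= len(a_list):
--         elem = a_list[-1 * index]
--         result -= elem
--         index += 1
--
--     return result
-- ===== SOURCE B (Python) =====
-- def subtract_reversed(a_list):
--     if not a_list:
--         return 0
--     return 2 * a_list[-1] - sum(a_list)
-- ===== Notes on version B (the rewrite author's own statement) =====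
-- stated objective: simpler
-- what changed: Replaces A's backward negative-index while-loop with a single builtin sum and the identity last - sum(others) = 2*last - sum(all).
import Mathlib
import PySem

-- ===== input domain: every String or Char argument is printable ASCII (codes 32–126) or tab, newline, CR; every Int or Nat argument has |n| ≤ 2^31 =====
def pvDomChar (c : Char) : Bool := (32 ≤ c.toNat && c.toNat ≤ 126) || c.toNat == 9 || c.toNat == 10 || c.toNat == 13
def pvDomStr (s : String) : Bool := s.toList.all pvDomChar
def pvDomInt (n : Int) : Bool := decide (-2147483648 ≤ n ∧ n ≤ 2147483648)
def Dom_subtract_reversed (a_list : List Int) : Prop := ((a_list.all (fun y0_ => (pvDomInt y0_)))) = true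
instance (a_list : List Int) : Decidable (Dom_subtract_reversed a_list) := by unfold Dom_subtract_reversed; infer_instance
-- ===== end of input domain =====

-- B replaces A's backward negative-index while-loop with one builtin sum and the identity last - sum(others) = 2*last - sum(all) (objective: simpler).

-- ===== PORT A =====
-- the while loop 'index = 2; while index <= len: ...; index += 1' is the fold over pyRange 2 (len+1) 1;
-- the negative indexing a_list[-1], a_list[-1*index] is always in range here, so '.getD 0' never fires.
def subtract_reversed (a_list : List Int) : Int :=
  if a_list.length = 0 then 0
  else
    let result := (PySem.List.pyGet? a_list (-1)).getD 0
    (PySem.List.pyRange 2 ((a_list.length : Int) + 1) 1).foldl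
      (fun r index => r - (PySem.List.pyGet? a_list (-1 * index)).getD 0) result

-- ===== PORT B =====
def subtract_reversed_alt (a_list : List Int) : Int :=
  if a_list = [] then 0 else 2 * a_list.getLastD 0 - a_list.sum

-- ===== PRECONDITION & SPEC =====
def Spec_subtract_reversed (a_list : List Int) (out : Int) : Prop := out = subtract_reversed_alt a_list
instance (a_list : List Int) (out : Int) : Decidable (Spec_subtract_reversed a_list out) := by unfold Spec_subtract_reversed; infer_instance

-- ===== CLAIM (what is proved, stated in full; the proofs are below) =====
def Claim_equal_subtract_reversed : Prop := ∀ (a_list : List Int), Dom_subtract_reversed a_list → Spec_subtract_reversed a_list (subtract_reversed a_list)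

-- ===== LEMMAS AND PROOFS =====

-- Python (y :: rest)[-i] = rest[-i] for 2 ≤ i ≤ length (y :: rest).
theorem pyGet?_neg_cons (y : Int) (rest : List Int) (i : Int)
    (h2 : 2 ≤ i) (hle : i ≤ (rest.length : Int)) :
    PySem.List.pyGet? (y :: rest) (-i) = PySem.List.pyGet? rest (-i) := by
  obtain ⟨k, rfl⟩ : ∃ k : Nat, i = (k : Int) := ⟨i.toNat, (Int.toNat_of_nonneg (by omega)).symm⟩
  have hk2 : 2 ≤ k := by exact_mod_cast h2
  have hkl : k ≤ rest.length := by exact_mod_cast hle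
  rw [PySem.List.pyGet?_neg_natCast (y :: rest) k (by omega) (by simp; omega),
      PySem.List.pyGet?_neg_natCast rest k (by omega) hkl]
  have : (y :: rest).length - k = (rest.length - k) + 1 := by simp; omega
  rw [this]
  simp

-- the loop of A, as a function of the list and the running accumulator
def loopA (l : List Int) (init : Int) : Int :=
  (PySem.List.pyRange 2 ((l.length : Int) + 1) 1).foldl
    (fun r index => r - (PySem.List.pyGet? l (-1 * index)).getD 0) init

theorem loopA_cons (y : Int) (rest : List Int) (init : Int) (h : rest ≠ []) :
    loopA (y :: rest) init = loopA rest init - y := by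
  have hlen : 1 ≤ rest.length := List.length_pos_iff.mpr h
  have hn : ((y :: rest).length : Int) = (rest.length : Int) + 1 := by simp
  unfold loopA
  rw [hn, PySem.List.pyRange_one_succ_right (by exact_mod_cast Nat.succ_le_succ hlen),
      List.foldl_append]
  have hlast : PySem.List.pyGet? (y :: rest) (-1 * ((rest.length : Int) + 1)) = some y := by
    have h1 : (-1 : Int) * ((rest.length : Int) + 1) = -(((rest.length + 1 : Nat) : Int)) := by
      push_cast; ring
    rw [h1, PySem.List.pyGet?_neg_natCast (y :: rest) (rest.length + 1) (by omega) (by simp)]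
    simp
  have hfold :
      (PySem.List.pyRange 2 ((rest.length : Int) + 1) 1).foldl
        (fun r index => r - (PySem.List.pyGet? (y :: rest) (-1 * index)).getD 0) init
      = (PySem.List.pyRange 2 ((rest.length : Int) + 1) 1).foldl
        (fun r index => r - (PySem.List.pyGet? rest (-1 * index)).getD 0) init := by
    apply PySem.List.foldl_congr_mem
    intro acc x hx
    rw [PySem.List.mem_pyRange_one] at hx
    have hneg : (-1 : Int) * x = -x := by ring
    rw [hneg, pyGet?_neg_cons y rest x hx.1 (by omega), ← hneg]
  rw [hfold]
  have h2 : (-1 : Int) * ((rest.length : Int) + 1) = -1 + -(rest.length : Int) := by ring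
  rw [h2] at hlast
  simp [hlast]

theorem loopA_eq (l : List Int) (init : Int) (h : l ≠ []) :
    loopA l init = init - l.dropLast.sum := by
  induction l generalizing init with
  | nil => exact absurd rfl h
  | cons y rest ih =>
    rcases eq_or_ne rest [] with hr | hr
    · subst hr
      simp [loopA, PySem.List.pyRange_one_eq_nil (by norm_num : ((2:Int)) ≥ 2)]
    · rw [loopA_cons y rest init hr, ih init hr]
      have : (y :: rest).dropLast = y :: rest.dropLast := by
        cases rest with
        | nil => exact absurd rfl hr
        | cons a as => simp
      rw [this]; simp; ring

theorem sum_eq_dropLast_add_last (l : List Int) (h : l ≠ []) :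
    l.sum = l.dropLast.sum + l.getLastD 0 := by
  rcases List.eq_nil_or_concat l with rfl | ⟨ys, x, rfl⟩
  · exact absurd rfl h
  · simp

-- ===== VERDICT (by name: the statement is the Claim_ definition above) =====
theorem subtract_reversed_spec : Claim_equal_subtract_reversed := by
  intro l _
  unfold Spec_subtract_reversed subtract_reversed subtract_reversed_alt
  rcases eq_or_ne l [] with rfl | h
  · simp
  · have hne : l.length ≠ 0 := by simpa using h
    simp only [if_neg hne, if_neg h]
    have hinit : (PySem.List.pyGet? l (-1)).getD 0 = l.getLastD 0 := by
      rw [PySem.List.pyGet?_neg_one]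
      cases l with
      | nil => exact absurd rfl h
      | cons a as => simp [List.getLastD_eq_getLast?]
    show loopA l ((PySem.List.pyGet? l (-1)).getD 0) = _
    rw [loopA_eq l _ h, hinit, sum_eq_dropLast_add_last l h]
    ring
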